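-- pv_equiv track=rewrite | github.com/GenoRobotics-EPFL/Primer-Design | helper.py | getFamiliesPerCluster
-- ===== SOURCE A (Python) =====
-- def getFamiliesPerCluster(cluster_labels, unique_labels, id_list, ID_family_mapping):
--     # get ids of sequences from each cluster
--     ids_per_cluster = {}
--     for cluster_label in unique_labels:
--         cluster_indices = [i for i, label in enumerate(cluster_labels) if label == cluster_label]
--         cluster_ids = [id_list[i] for i in cluster_indices]
--         ids_per_cluster[cluster_label] = cluster_ids
--
--     # get families
--     family_frequencies_per_cluster = {}
--     family_count_per_cluster = {}
--     for cluster_label, cluster_ids in ids_per_cluster.items():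
--         family_frequencies = {}
--
--         for id in cluster_ids:
--             family = ID_family_mapping.get(id)
--             if family:
--                 family_frequencies[family] = family_frequencies.get(family, 0) + 1
--
--         family_frequencies_per_cluster[cluster_label] = family_frequencies
--         family_count_per_cluster[cluster_label] = len(family_frequencies.keys())
--
--     return family_count_per_cluster, family_frequencies_per_cluster
-- ===== SOURCE B (Python) =====
-- def getFamiliesPerCluster(cluster_labels, unique_labels, id_list, ID_family_mapping):
--     # Single pass over cluster_labels with pre-seeded per-cluster frequency dicts.
--     family_frequencies_per_cluster = {label: {} for label in unique_labels}
--     for i, label in enumerate(cluster_labels):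
--         freqs = family_frequencies_per_cluster.get(label)
--         if freqs is None:
--             continue
--         family = ID_family_mapping.get(id_list[i])
--         if family:
--             freqs[family] = freqs.get(family, 0) + 1
--     family_count_per_cluster = {label: len(freqs) for label, freqs in family_frequencies_per_cluster.items()}
--     return family_count_per_cluster, family_frequencies_per_cluster
-- ===== Notes on version B (the rewrite author's own statement) =====
-- stated objective: faster
-- what changed: B replaces A's per-label rescans of cluster_labels (one full scan and index-list build per unique label, then a second grouping pass) by a single pass over enumerate(cluster_labels) that increments pre-seeded per-label frequency dicts, with counts derived at the end.
import Mathlib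
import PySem

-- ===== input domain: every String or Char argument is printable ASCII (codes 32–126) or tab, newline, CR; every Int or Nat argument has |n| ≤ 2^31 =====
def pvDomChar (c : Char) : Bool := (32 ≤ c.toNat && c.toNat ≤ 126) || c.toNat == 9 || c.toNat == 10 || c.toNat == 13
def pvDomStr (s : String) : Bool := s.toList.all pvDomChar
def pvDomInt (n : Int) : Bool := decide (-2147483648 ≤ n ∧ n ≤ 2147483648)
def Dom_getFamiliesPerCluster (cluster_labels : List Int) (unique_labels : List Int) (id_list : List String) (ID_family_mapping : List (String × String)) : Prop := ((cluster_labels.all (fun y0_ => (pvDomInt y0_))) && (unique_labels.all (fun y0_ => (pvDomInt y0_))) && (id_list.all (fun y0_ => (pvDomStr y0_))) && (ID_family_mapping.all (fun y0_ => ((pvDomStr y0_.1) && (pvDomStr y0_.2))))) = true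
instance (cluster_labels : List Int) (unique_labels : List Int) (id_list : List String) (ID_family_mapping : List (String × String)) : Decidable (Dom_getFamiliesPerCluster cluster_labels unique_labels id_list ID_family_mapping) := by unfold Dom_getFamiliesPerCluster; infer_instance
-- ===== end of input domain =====

-- B replaces A's per-label rescans of cluster_labels (O(|unique_labels|·|cluster_labels|)) by one pass
-- over enumerate(cluster_labels) into pre-seeded per-cluster frequency dicts (O(N + U)); same return value.

-- ===== PORT A =====
-- Literal port of A: ids grouped per cluster label by rescanning cluster_labels for each unique label,
-- then a second loop over that dict builds the frequency and count dicts.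
-- id_list[i] is ported as pyGetD with default "" — exact on Pre_ (the index is in range there).
def getFamiliesPerCluster (cluster_labels : List Int) (unique_labels : List Int) (id_list : List String) (ID_family_mapping : List (String × String)) : (List (Int × Int)) × (List (Int × List (String × Int))) :=
  let ids_per_cluster : PySem.Dict Int (List String) :=
    unique_labels.foldl (fun d cluster_label =>
      let cluster_indices := ((PySem.List.enumerate cluster_labels).filter (fun p => p.2 == cluster_label)).map (·.1)
      let cluster_ids := cluster_indices.map (fun i => PySem.List.pyGetD id_list i "")
      d.insert cluster_label cluster_ids) PySem.Dict.empty
  let st := ids_per_cluster.items.foldl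
    (fun (st : PySem.Dict Int (PySem.Dict String Int) × PySem.Dict Int Int) p =>
      let family_frequencies := p.2.foldl (fun ff id =>
        match ID_family_mapping.lookup id with
        | some family => if family ≠ "" then ff.modify family 0 (· + 1) else ff
        | none => ff) PySem.Dict.empty
      (st.1.insert p.1 family_frequencies,
       st.2.insert p.1 (family_frequencies.keys.length : Int)))
    (PySem.Dict.empty, PySem.Dict.empty)
  (st.2.items, st.1.items.map (fun q => (q.1, q.2.items)))

-- ===== PORT B =====
-- Literal port of B: seed {label: {} for label in unique_labels}, one pass over enumerate(cluster_labels)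
-- incrementing the seeded dicts, then counts from the frequency dicts.
def getFamiliesPerCluster_alt (cluster_labels : List Int) (unique_labels : List Int) (id_list : List String) (ID_family_mapping : List (String × String)) : (List (Int × Int)) × (List (Int × List (String × Int))) :=
  let ffpc0 : PySem.Dict Int (PySem.Dict String Int) :=
    unique_labels.foldl (fun d label => d.insert label PySem.Dict.empty) PySem.Dict.empty
  let ffpc := (PySem.List.enumerate cluster_labels).foldl (fun d p =>
      if d.contains p.2 then
        match ID_family_mapping.lookup (PySem.List.pyGetD id_list p.1 "") with
        | some family =>
            if family ≠ "" then d.modify p.2 PySem.Dict.empty (fun fr => fr.modify family 0 (· + 1)) else d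
        | none => d
      else d) ffpc0
  (ffpc.items.map (fun q => (q.1, (q.2.keys.length : Int))),
   ffpc.items.map (fun q => (q.1, q.2.items)))

-- ===== PRECONDITION & SPEC =====
-- Pre_ excludes exactly the inputs where Python A raises IndexError: a position whose label occurs in
-- unique_labels but lies beyond the end of id_list.
def Pre_getFamiliesPerCluster (cluster_labels : List Int) (unique_labels : List Int) (id_list : List String) (ID_family_mapping : List (String × String)) : Prop :=
  ∀ p ∈ PySem.List.enumerate cluster_labels, p.2 ∈ unique_labels → p.1 < (id_list.length : Int)
instance (cluster_labels : List Int) (unique_labels : List Int) (id_list : List String) (ID_family_mapping : List (String × String)) : Decidable (Pre_getFamiliesPerCluster cluster_labels unique_labels id_list ID_family_mapping) := by unfold Pre_getFamiliesPerCluster; infer_instance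
def pvWitness_getFamiliesPerCluster : List Int × List Int × List String × (List (String × String)) :=
  ([0, 1, 0], [0, 1], ["a", "b", "c"], [("a", "F"), ("b", "G")])

def Spec_getFamiliesPerCluster (cluster_labels : List Int) (unique_labels : List Int) (id_list : List String) (ID_family_mapping : List (String × String)) (out : (List (Int × Int)) × (List (Int × List (String × Int)))) : Prop := out = getFamiliesPerCluster_alt cluster_labels unique_labels id_list ID_family_mapping
instance (cluster_labels : List Int) (unique_labels : List Int) (id_list : List String) (ID_family_mapping : List (String × String)) (out : (List (Int × Int)) × (List (Int × List (String × Int)))) : Decidable (Spec_getFamiliesPerCluster cluster_labels unique_labels id_list ID_family_mapping out) := by unfold Spec_getFamiliesPerCluster; infer_instance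

-- ===== CLAIM (what is proved, stated in full; the proofs are below) =====
def Claim_equal_getFamiliesPerCluster : Prop := ∀ (cluster_labels : List Int) (unique_labels : List Int) (id_list : List String) (ID_family_mapping : List (String × String)), Dom_getFamiliesPerCluster cluster_labels unique_labels id_list ID_family_mapping → Pre_getFamiliesPerCluster cluster_labels unique_labels id_list ID_family_mapping → Spec_getFamiliesPerCluster cluster_labels unique_labels id_list ID_family_mapping (getFamiliesPerCluster cluster_labels unique_labels id_list ID_family_mapping)

-- ===== LEMMAS AND PROOFS =====

-- a fold inserting a value that depends only on the key: lookup
theorem pv_get?_seedfold {ν : Type} (l : List Int) (g : Int → ν) (d : PySem.Dict Int ν) (k : Int) :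
    (l.foldl (fun d x => d.insert x (g x)) d).get? k = if k ∈ l then some (g k) else d.get? k := by
  induction l generalizing d with
  | nil => simp
  | cons a t ih =>
    simp only [List.foldl_cons, ih, PySem.Dict.get?_insert, List.mem_cons]
    by_cases hk : k ∈ t <;> by_cases hka : k = a <;> simp [hk, hka]

-- a fold inserting a value that depends only on the key, from empty: items
theorem pv_items_seedfold {ν : Type} (l : List Int) (g : Int → ν) (dflt : ν) :
    (l.foldl (fun d x => d.insert x (g x)) PySem.Dict.empty).items
      = (PySem.Set.ofList l).map (fun k => (k, g k)) := by
  have hkeys : (l.foldl (fun d x => d.insert x (g x)) (PySem.Dict.empty : PySem.Dict Int ν)).keys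
      = PySem.Set.ofList l := by
    rw [PySem.Dict.keys_foldl_insert l (fun _ x => g x) PySem.Dict.empty]
    simp [PySem.Set.update_nil_left]
  have hnd : (l.foldl (fun d x => d.insert x (g x)) (PySem.Dict.empty : PySem.Dict Int ν)).keys.Nodup := by
    rw [hkeys]; exact PySem.Set.nodup_ofList l
  rw [PySem.Dict.items_eq_map_keys _ hnd dflt, hkeys]
  refine List.map_congr_left (fun k hk => ?_)
  have hmem : k ∈ l := (PySem.Set.mem_ofList l k).1 hk
  simp [PySem.Dict.getD_eq_get?_getD, pv_get?_seedfold, hmem]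

-- B's main loop does not change the key set
theorem pv_bfold_keys (m : List (String × String)) (il : List String) (l : List (Int × Int))
    (d : PySem.Dict Int (PySem.Dict String Int)) :
    (l.foldl (fun d p =>
      if d.contains p.2 then
        match m.lookup (PySem.List.pyGetD il p.1 "") with
        | some family =>
            if family ≠ "" then d.modify p.2 PySem.Dict.empty (fun fr => fr.modify family 0 (· + 1)) else d
        | none => d
      else d) d).keys = d.keys := by
  induction l generalizing d with
  | nil => rfl
  | cons p t ih =>
    simp only [List.foldl_cons]
    simp only [ne_eq, ite_not] at ih ⊢
    by_cases hc : d.contains p.2 = true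
    · rcases hm : m.lookup (PySem.List.pyGetD il p.1 "") with _ | family
      · simp [hc, ih]
      · by_cases hf : family = ""
        · simp [hc, hf, ih]
        · have hkm : (d.modify p.2 PySem.Dict.empty fun fr => fr.modify family 0 (· + 1)).keys = d.keys := by
            rw [PySem.Dict.keys_modify, PySem.Dict.keys_insert_of_contains _ _ hc]
          simp [hc, hf, ih, hkm]
    · simp [hc, ih]

-- pointwise value of B's main loop: the entry at a seeded key is the fold of its own steps
theorem pv_bfold_getD (m : List (String × String)) (il : List String) (l : List (Int × Int))
    (d : PySem.Dict Int (PySem.Dict String Int)) (k : Int) (hk : d.contains k = true) :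
    ((l.foldl (fun d p =>
      if d.contains p.2 then
        match m.lookup (PySem.List.pyGetD il p.1 "") with
        | some family =>
            if family ≠ "" then d.modify p.2 PySem.Dict.empty (fun fr => fr.modify family 0 (· + 1)) else d
        | none => d
      else d) d).getD k PySem.Dict.empty)
    = ((l.filter (fun p => p.2 == k)).foldl (fun fr p =>
        match m.lookup (PySem.List.pyGetD il p.1 "") with
        | some family => if family ≠ "" then fr.modify family 0 (· + 1) else fr
        | none => fr) (d.getD k PySem.Dict.empty)) := by
  induction l generalizing d with
  | nil => rfl
  | cons p t ih =>
    simp only [List.foldl_cons, List.filter_cons]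
    simp only [ne_eq, ite_not] at ih ⊢
    by_cases hpk : p.2 = k
    · subst hpk
      rcases hm : m.lookup (PySem.List.pyGetD il p.1 "") with _ | family
      · simp [hk, hm, ih d hk]
      · by_cases hf : family = ""
        · simp [hk, hm, hf, ih d hk]
        · have hc' : (d.modify p.2 PySem.Dict.empty fun fr => fr.modify family 0 (· + 1)).contains p.2 = true := by
            simp [PySem.Dict.contains_modify]
          have hgd : (d.modify p.2 PySem.Dict.empty fun fr => fr.modify family 0 (· + 1)).getD p.2 PySem.Dict.empty
              = (d.getD p.2 PySem.Dict.empty).modify family 0 (· + 1) := by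
            simp
          simp [hk, hm, hf, ih _ hc', hgd]
    · have hpkb : (p.2 == k) = false := by simp [hpk]
      by_cases hc : d.contains p.2 = true
      · rcases hm : m.lookup (PySem.List.pyGetD il p.1 "") with _ | family
        · simp [hc, hpkb, ih d hk]
        · by_cases hf : family = ""
          · simp [hc, hf, hpkb, ih d hk]
          · have hc2 : (d.modify p.2 PySem.Dict.empty fun fr => fr.modify family 0 (· + 1)).contains k = true := by
              simp [PySem.Dict.contains_modify, hk]
            have hgd : (d.modify p.2 PySem.Dict.empty fun fr => fr.modify family 0 (· + 1)).getD k PySem.Dict.empty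
                = d.getD k PySem.Dict.empty := by
              rw [PySem.Dict.getD_modify, if_neg (fun h => hpk h.symm)]
            simp [hc, hf, hpkb, ih _ hc2, hgd]
      · simp [hc, hpkb, ih d hk]

-- a pair-building fold splits into two folds
theorem pv_pairfold {α : Type} (L : List α) (key : α → Int) (v1 : α → PySem.Dict String Int) (v2 : α → Int)
    (a : PySem.Dict Int (PySem.Dict String Int)) (b : PySem.Dict Int Int) :
    (L.foldl (fun st p => (st.1.insert (key p) (v1 p), st.2.insert (key p) (v2 p))) (a, b))
    = (L.foldl (fun d p => d.insert (key p) (v1 p)) a,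
       L.foldl (fun d p => d.insert (key p) (v2 p)) b) := by
  induction L generalizing a b with
  | nil => rfl
  | cons x t ih => exact ih _ _

-- ===== VERDICT (by name: the statement is the Claim_ definition above) =====
theorem getFamiliesPerCluster_spec : Claim_equal_getFamiliesPerCluster := by
  intro cl ul il m _ _
  show getFamiliesPerCluster cl ul il m = getFamiliesPerCluster_alt cl ul il m
  simp only [getFamiliesPerCluster, getFamiliesPerCluster_alt]
  -- B's per-key value
  set Bval : Int → PySem.Dict String Int := fun k =>
    (List.filter (fun p => p.2 == k) (PySem.List.enumerate cl)).foldl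
      (fun fr p =>
        match List.lookup (PySem.List.pyGetD il p.1 "") m with
        | some family => if family ≠ "" then fr.modify family 0 (· + 1) else fr
        | none => fr) PySem.Dict.empty with hBval
  -- A's grouping dict
  have hAitems :
      (List.foldl (fun d cluster_label => d.insert cluster_label
          (List.map (fun i => PySem.List.pyGetD il i "")
            (List.map (fun x => x.1)
              (List.filter (fun p => p.2 == cluster_label) (PySem.List.enumerate cl)))))
        PySem.Dict.empty ul).items
      = (PySem.Set.ofList ul).map (fun k => (k,
          List.map (fun i => PySem.List.pyGetD il i "")
            (List.map (fun x => x.1)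
              (List.filter (fun p => p.2 == k) (PySem.List.enumerate cl))))) :=
    pv_items_seedfold ul _ []
  rw [hAitems, pv_pairfold]
  -- the B-side dict
  set BD : PySem.Dict Int (PySem.Dict String Int) := (List.foldl
      (fun d p =>
        if d.contains p.2 then
          match List.lookup (PySem.List.pyGetD il p.1 "") m with
          | some family =>
            if family ≠ "" then d.modify p.2 PySem.Dict.empty fun fr => fr.modify family 0 (· + 1) else d
          | none => d
        else d)
      (List.foldl (fun d label => d.insert label PySem.Dict.empty) PySem.Dict.empty ul)
      (PySem.List.enumerate cl)) with hBD
  have hkeys0 : (List.foldl (fun d label => d.insert label PySem.Dict.empty) (PySem.Dict.empty : PySem.Dict Int (PySem.Dict String Int)) ul).keys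
      = PySem.Set.ofList ul := by
    rw [PySem.Dict.keys_foldl_insert ul (fun _ _ => PySem.Dict.empty) PySem.Dict.empty]
    simp [PySem.Set.update_nil_left]
  have hkeysB : BD.keys = PySem.Set.ofList ul := by
    rw [hBD]; exact (pv_bfold_keys m il _ _).trans hkeys0
  have hndB : BD.keys.Nodup := by rw [hkeysB]; exact PySem.Set.nodup_ofList ul
  have hBitems : BD.items = (PySem.Set.ofList ul).map (fun k => (k, Bval k)) := by
    rw [PySem.Dict.items_eq_map_keys BD hndB PySem.Dict.empty, hkeysB]
    refine List.map_congr_left (fun k hk => ?_)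
    have hmem : k ∈ ul := (PySem.Set.mem_ofList ul k).1 hk
    have hc0 : (List.foldl (fun d label => d.insert label PySem.Dict.empty) (PySem.Dict.empty : PySem.Dict Int (PySem.Dict String Int)) ul).contains k = true := by
      rw [PySem.Dict.contains_eq_decide_mem_keys, hkeys0]
      simp [PySem.Set.mem_ofList, hmem]
    have hg0 : (List.foldl (fun d label => d.insert label PySem.Dict.empty) (PySem.Dict.empty : PySem.Dict Int (PySem.Dict String Int)) ul).getD k PySem.Dict.empty
        = PySem.Dict.empty := by
      rw [PySem.Dict.getD_eq_get?_getD, pv_get?_seedfold ul (fun _ => PySem.Dict.empty)]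
      simp [hmem]
    refine congrArg (fun v => (k, v)) ?_
    rw [hBD]
    have h2 := pv_bfold_getD m il (PySem.List.enumerate cl) _ k hc0
    rw [hg0] at h2
    exact h2
  rw [hBitems]
  -- collapse A's two phase-2 folds
  simp only [List.foldl_map]
  rw [pv_items_seedfold (PySem.Set.ofList ul) _ ((0 : Int)),
      pv_items_seedfold (PySem.Set.ofList ul) _ (PySem.Dict.empty : PySem.Dict String Int),
      PySem.Set.ofList_eq_self_of_nodup _ (PySem.Set.nodup_ofList ul)]
  simp only [List.map_map]
  rfl
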